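-- pv_equiv track=rewrite | github.com/evgeniy-kulikov/Stepik_Python-Simulator | 10 Списки 1.py | sum_of_misspairs
-- ===== SOURCE A (Python) =====
-- def sum_of_misspairs(data):
--     if not data:
--         return '()'
--     else:
--         res = []
--         while data:
--             res.append(f'({data[0]},{data[-1]})')
--             data = data[1:-1]
--         return ','.join(res)
-- ===== SOURCE B (Python) =====
-- def sum_of_misspairs(data):
--     if not data:
--         return '()'
--     parts = [f'({a},{b})' for a, b in zip(data, reversed(data))][:(len(data) + 1) // 2]
--     return ','.join(parts)
-- ===== Notes on version B (the rewrite author's own statement) =====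
-- stated objective: faster
-- what changed: Replaced the while-loop that repeatedly reslices the list (data = data[1:-1]) with a single zip of the list against its reverse, keeping the first ceil(n/2) formatted pairs.
import Mathlib
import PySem

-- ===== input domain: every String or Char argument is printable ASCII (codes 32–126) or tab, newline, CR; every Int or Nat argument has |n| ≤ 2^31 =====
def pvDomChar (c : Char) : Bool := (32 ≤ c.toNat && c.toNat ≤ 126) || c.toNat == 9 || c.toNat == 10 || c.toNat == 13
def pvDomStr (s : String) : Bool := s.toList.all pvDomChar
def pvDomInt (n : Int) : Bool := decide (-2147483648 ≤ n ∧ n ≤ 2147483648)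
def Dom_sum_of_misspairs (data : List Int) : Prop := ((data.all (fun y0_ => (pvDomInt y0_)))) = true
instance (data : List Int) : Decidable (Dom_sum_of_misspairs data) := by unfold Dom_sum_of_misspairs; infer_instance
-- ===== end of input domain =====

-- B replaces A's quadratic loop of repeated `data = data[1:-1]` reslicing by one O(n)
-- zip of the list with its reverse (objective: faster, asymptotic).

-- f'({a},{b})' — shared formatting helper of both ports
def pvPair (a b : Int) : String :=
  "(" ++ PySem.Int.toStr a ++ "," ++ PySem.Int.toStr b ++ ")"

-- ===== PORT A =====
-- the while loop: res.append(f'({data[0]},{data[-1]})'); data = data[1:-1]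
def pvALoop : List Int → List String → List String
  | [], res => res
  | x :: rest, res =>
      pvALoop (PySem.List.slice (x :: rest) (some 1) (some (-1)))
              (res ++ [pvPair x (PySem.List.pyGetD (x :: rest) (-1) 0)])
  termination_by data _ => data.length
  decreasing_by
    simp [PySem.List.slice, PySem.List.clampIdx]

def sum_of_misspairs (data : List Int) : String :=
  if data = [] then "()"
  else PySem.Str.join "," (pvALoop data [])

-- ===== PORT B =====
def sum_of_misspairs_alt (data : List Int) : String :=
  if data = [] then "()"
  else
    PySem.Str.join ","
      (((data.zip data.reverse).map (fun p => pvPair p.1 p.2)).take ((data.length + 1) / 2))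

-- ===== PRECONDITION & SPEC =====
def Spec_sum_of_misspairs (data : List Int) (out : String) : Prop := out = sum_of_misspairs_alt data
instance (data : List Int) (out : String) : Decidable (Spec_sum_of_misspairs data out) := by unfold Spec_sum_of_misspairs; infer_instance

-- ===== CLAIM (what is proved, stated in full; the proofs are below) =====
def Claim_equal_sum_of_misspairs : Prop := ∀ (data : List Int), Dom_sum_of_misspairs data → Spec_sum_of_misspairs data (sum_of_misspairs data)

-- ===== LEMMAS AND PROOFS =====

-- what B computes, as a function of the list
def pvBParts (data : List Int) : List String :=
  ((data.zip data.reverse).map (fun p => pvPair p.1 p.2)).take ((data.length + 1) / 2)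

lemma pv_slice_one_neg_one (xs : List Int) :
    PySem.List.slice xs (some 1) (some (-1)) = xs.tail.dropLast := by
  simp [PySem.List.slice, PySem.List.clampIdx]
  rcases xs with _ | ⟨x, rest⟩
  · simp
  · simp [List.dropLast_eq_take]

lemma pvBParts_nil : pvBParts [] = [] := by simp [pvBParts]

lemma pvBParts_singleton (x : Int) : pvBParts [x] = [pvPair x x] := by
  simp [pvBParts]

lemma pvBParts_cons_append (x y : Int) (mid : List Int) :
    pvBParts (x :: (mid ++ [y])) = pvPair x y :: pvBParts mid := by
  have hrev : (x :: (mid ++ [y])).reverse = y :: (mid.reverse ++ [x]) := by simp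
  have hzip : (mid ++ [y]).zip (mid.reverse ++ [x]) = mid.zip mid.reverse ++ [(y, x)] := by
    rw [List.zip_append (by simp)]
    simp
  have hlen : (x :: (mid ++ [y])).length = mid.length + 2 := by simp
  unfold pvBParts
  rw [hrev, hlen]
  simp only [List.zip_cons_cons, hzip, List.map_cons, List.map_append]
  have hdiv : (mid.length + 2 + 1) / 2 = (mid.length + 1) / 2 + 1 := by omega
  rw [hdiv, List.take_succ_cons]
  congr 1
  rw [List.take_append_of_le_length]
  simp
  omega

lemma pvALoop_eq_aux : ∀ (n : Nat) (data : List Int), data.length = n →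
    ∀ res, pvALoop data res = res ++ pvBParts data := by
  intro n
  induction n using Nat.strong_induction_on with
  | _ n ih =>
    intro data hlen res
    match data with
    | [] => simp [pvALoop, pvBParts_nil]
    | [x] =>
        rw [pvALoop, pv_slice_one_neg_one]
        simp [pvALoop, pvBParts_singleton, PySem.List.pyGetD, PySem.List.pyGet?, PySem.List.pyIdx?]
    | x :: (r :: rs) =>
        obtain ⟨mid, y, hmy⟩ : ∃ mid y, r :: rs = mid ++ [y] :=
          ⟨(r :: rs).dropLast, (r :: rs).getLast (by simp), (List.dropLast_append_getLast (by simp)).symm⟩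
        rw [hmy, pvALoop, pv_slice_one_neg_one]
        rw [PySem.List.pyGetD_neg_one (x :: (mid ++ [y])) 0 (by simp)]
        have hgl : (x :: (mid ++ [y])).getLast (by simp) = y := by
          simp [List.getLast_cons]
        have htl : (x :: (mid ++ [y])).tail.dropLast = mid := by
          simp
        rw [hgl, htl, ih mid.length (by subst hlen; rw [hmy]; simp) mid rfl,
          pvBParts_cons_append]
        simp

lemma pvALoop_eq (data : List Int) (res : List String) :
    pvALoop data res = res ++ pvBParts data :=
  pvALoop_eq_aux data.length data rfl res

-- ===== VERDICT (by name: the statement is the Claim_ definition above) =====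
theorem sum_of_misspairs_spec : Claim_equal_sum_of_misspairs := by
  intro data _
  unfold Spec_sum_of_misspairs sum_of_misspairs sum_of_misspairs_alt
  split_ifs with h
  · rfl
  · rw [pvALoop_eq data [], pvBParts]; rfl
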